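-- pv_equiv track=rewrite | github.com/subrotonpi/clone_evaluation | data/gptcb_cross/gptcb_cross/None/99.py | haveThree
-- ===== SOURCE A (Python) =====
-- def haveThree(nums):
--     count = 0
--     flag = False
--     for i in range(len(nums)):
--         if nums[i] == 3:
--             if flag:
--                 return False
--             else:
--                 count += 1
--                 flag = True
--         else:
--             flag = False
--     return count == 3
-- ===== SOURCE B (Python) =====
-- def haveThree(nums):
--     idx = [i for i, x in enumerate(nums) if x == 3]
--     return len(idx) == 3 and all(b - a > 1 for a, b in zip(idx, idx[1:]))
-- ===== Notes on version B (the rewrite author's own statement) =====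
-- stated objective: alternative
-- what changed: Replaced A's single stateful flag-tracking early-return loop with a build-then-analyse decomposition: collect the indices of all 3's, then check count == 3 and that consecutive indices differ by more than 1.
import Mathlib
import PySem

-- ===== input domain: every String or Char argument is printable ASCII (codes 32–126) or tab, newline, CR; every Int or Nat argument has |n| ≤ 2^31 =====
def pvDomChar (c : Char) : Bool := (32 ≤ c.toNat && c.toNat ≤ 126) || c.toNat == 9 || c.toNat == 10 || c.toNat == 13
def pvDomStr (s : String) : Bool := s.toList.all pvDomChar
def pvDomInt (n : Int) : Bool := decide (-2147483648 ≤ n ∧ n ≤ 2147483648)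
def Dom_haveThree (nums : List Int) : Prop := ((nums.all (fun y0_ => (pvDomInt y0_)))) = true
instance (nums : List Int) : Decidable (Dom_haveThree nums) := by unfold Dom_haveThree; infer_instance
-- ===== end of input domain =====

-- B collects the indices of the 3's and checks count and gaps separately; A is a single flag-tracking loop. Return value only; no mutation.

-- ===== PORT A =====
-- the for-loop over range(len(nums)) with state (count, flag) and the early 'return False'
def haveThreeLoop (xs : List Int) (count : Int) (flag : Bool) : Bool :=
  match xs with
  | [] => count == 3
  | x :: rest =>
    if x == 3 then
      if flag then false else haveThreeLoop rest (count + 1) true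
    else
      haveThreeLoop rest count false

def haveThree (nums : List Int) : Bool := haveThreeLoop nums 0 false

-- ===== PORT B =====
def haveThree_alt (nums : List Int) : Bool :=
  let idx := ((PySem.List.enumerate nums).filter (fun p => p.2 == 3)).map (fun p => p.1)
  (idx.length == 3) && ((idx.zip idx.tail).all (fun p => p.2 - p.1 > 1))

-- ===== PRECONDITION & SPEC =====
def Spec_haveThree (nums : List Int) (out : Bool) : Prop := out = haveThree_alt nums
instance (nums : List Int) (out : Bool) : Decidable (Spec_haveThree nums out) := by unfold Spec_haveThree; infer_instance

-- ===== CLAIM (what is proved, stated in full; the proofs are below) =====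
def Claim_equal_haveThree : Prop := ∀ (nums : List Int), Dom_haveThree nums → Spec_haveThree nums (haveThree nums)

-- ===== LEMMAS AND PROOFS =====

-- "no 3 adjacent to a previous 3", with flag = previous element was 3
def noAdj (flag : Bool) (xs : List Int) : Bool :=
  match xs with
  | [] => true
  | x :: rest => !(flag && x == 3) && noAdj (x == 3) rest

-- the index list B builds, starting at base i
def idxFrom (i : Int) (xs : List Int) : List Int :=
  ((PySem.List.enumerate xs i).filter (fun p => p.2 == 3)).map (fun p => p.1)

-- the gaps check
def gOk (l : List Int) : Bool := (l.zip l.tail).all (fun p => p.2 - p.1 > 1)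

theorem idxFrom_cons (i : Int) (x : Int) (xs : List Int) :
    idxFrom i (x :: xs) = if x = 3 then i :: idxFrom (i + 1) xs else idxFrom (i + 1) xs := by
  simp only [idxFrom, PySem.List.enumerate_cons, List.filter_cons]
  split_ifs with h <;> simp_all

theorem gOk_cons_cons (a b : Int) (l : List Int) :
    gOk (a :: b :: l) = ((b - a > 1 : Bool) && gOk (b :: l)) := by
  simp [gOk]

theorem length_idxFrom (i : Int) (xs : List Int) :
    (idxFrom i xs).length = xs.count 3 := by
  induction xs generalizing i with
  | nil => simp [idxFrom]
  | cons x xs ih =>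
    by_cases hx : x = 3
    · simp [idxFrom_cons, List.count_cons, hx, ih (i+1)]
    · simp [idxFrom_cons, List.count_cons, hx, ih (i+1)]

theorem gOk_cons_idxFrom (xs : List Int) (i j : Int) (h : j < i) :
    gOk (j :: idxFrom i xs) = noAdj (i == j + 1) xs := by
  induction xs generalizing i j with
  | nil => simp [idxFrom, gOk, noAdj]
  | cons x xs ih =>
    rw [idxFrom_cons]
    by_cases hx : x = 3
    · subst hx
      rw [if_pos rfl, gOk_cons_cons, ih (i+1) i (by omega)]
      simp only [noAdj]
      have h1 : ((i + 1 : Int) == i + 1) = true := by simp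
      rw [h1]
      have : ((i - j > 1 : Bool)) = !(i == j + 1) := by
        by_cases hij : i = j + 1
        · subst hij; simp
        · have h2 : (i == j + 1) = false := by simp [hij]
          have h3 : i - j > 1 := by omega
          simp [h2, h3]
      rw [this]
      simp [Bool.and_comm]
    · rw [if_neg hx, ih (i+1) j (by omega)]
      have h1 : ((i + 1 : Int) == j + 1) = false := by simp; omega
      have h2 : (x == (3:Int)) = false := by simp [hx]
      simp [noAdj, h1, h2]

theorem gOk_idxFrom (xs : List Int) (i : Int) :
    gOk (idxFrom i xs) = noAdj false xs := by
  induction xs generalizing i with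
  | nil => simp [idxFrom, gOk, noAdj]
  | cons x xs ih =>
    rw [idxFrom_cons]
    by_cases hx : x = 3
    · subst hx
      rw [if_pos rfl, gOk_cons_idxFrom xs (i+1) i (by omega)]
      simp [noAdj]
    · rw [if_neg hx, ih (i+1)]
      have h2 : (x == (3:Int)) = false := by simp [hx]
      simp [noAdj, h2]

theorem haveThreeLoop_eq (xs : List Int) (c : Int) (b : Bool) :
    haveThreeLoop xs c b = (noAdj b xs && (c + (xs.count 3 : Int) == 3)) := by
  induction xs generalizing c b with
  | nil => simp [haveThreeLoop, noAdj]
  | cons x xs ih =>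
    simp only [haveThreeLoop, noAdj, List.count_cons]
    by_cases hx : x = 3
    · subst hx
      cases b with
      | false =>
        simp only [if_pos rfl, ih (c+1) true]
        have : c + 1 + (xs.count 3 : Int) = c + ((xs.count 3 : Int) + 1) := by ring
        simp [this]
      | true => simp
    · have h2 : (x == (3:Int)) = false := by simp [hx]
      rw [h2]
      simp only [if_neg hx, ih c false]
      simp [hx, eq_comm]

-- ===== VERDICT (by name: the statement is the Claim_ definition above) =====
theorem haveThree_spec : Claim_equal_haveThree := by
  intro nums _
  show haveThree nums = haveThree_alt nums
  have hB : haveThree_alt nums = ((idxFrom 0 nums).length == 3 && gOk (idxFrom 0 nums)) := rfl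
  rw [hB, haveThree, haveThreeLoop_eq, gOk_idxFrom, length_idxFrom, Bool.and_comm]
  congr 1
  by_cases hc : nums.count 3 = 3 <;> simp [hc] <;> omega
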